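-- pv_equiv track=rewrite | github.com/KoriKiria/owui-search-tool | app/providers/playwright_provider.py | should_bypass_proxy
-- ===== SOURCE A (Python) =====
-- def should_bypass_proxy(host: str, no_proxy: str | None) -> bool:
--     if not no_proxy:
--         return False
--     entries = [entry.strip().lower() for entry in no_proxy.split(",") if entry.strip()]
--     normalized_host = host.lower()
--     for entry in entries:
--         if entry == "*":
--             return True
--         trimmed = entry.lstrip(".")
--         if normalized_host == trimmed or normalized_host.endswith(f".{trimmed}"):
--             return True
--     return False
-- ===== SOURCE B (Python) =====
-- def should_bypass_proxy(host, no_proxy):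
--     if not no_proxy:
--         return False
--     entries = {e.strip().lower() for e in no_proxy.split(",") if e.strip()}
--     if "*" in entries:
--         return True
--     bypass = {e.lstrip(".") for e in entries}
--     h = host.lower()
--     candidates = {h} | {h[i + 1:] for i, c in enumerate(h) if c == "."}
--     return not bypass.isdisjoint(candidates)
-- ===== Notes on version B (the rewrite author's own statement) =====
-- stated objective: idiomatic
-- what changed: B builds a set of normalized bypass entries once, checks '*' membership, and intersects it with the set of the host's dot-boundary suffixes, instead of A's per-entry loop with equality/endswith tests.
import Mathlib
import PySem

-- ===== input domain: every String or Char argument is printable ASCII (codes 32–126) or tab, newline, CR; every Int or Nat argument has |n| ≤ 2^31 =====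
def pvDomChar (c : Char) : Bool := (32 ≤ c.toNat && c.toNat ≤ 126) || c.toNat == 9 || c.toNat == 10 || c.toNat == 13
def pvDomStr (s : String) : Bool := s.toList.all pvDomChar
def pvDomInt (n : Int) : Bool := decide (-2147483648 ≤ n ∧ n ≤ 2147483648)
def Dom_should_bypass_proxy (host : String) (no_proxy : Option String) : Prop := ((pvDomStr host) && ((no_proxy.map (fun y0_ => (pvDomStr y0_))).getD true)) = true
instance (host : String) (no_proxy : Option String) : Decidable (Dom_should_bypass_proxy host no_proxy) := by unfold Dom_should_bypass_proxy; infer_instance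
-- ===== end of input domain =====

-- B replaces A's scan over bypass entries (endswith per entry) by set lookups: it builds the set
-- of normalized entries once and intersects it with the host's dot-boundary suffixes (objective: idiomatic).

-- ===== PORT A =====
def should_bypass_proxy (host : String) (no_proxy : Option String) : Bool :=
  match no_proxy with
  | none => false
  | some np =>
    if np = "" then false  -- 'if not no_proxy'
    else
      -- entries = [entry.strip().lower() for entry in no_proxy.split(",") if entry.strip()]
      let entries := ((PySem.Chars.splitOn np.toList [',']).filter
          (fun e => !(PySem.Chars.strip e).isEmpty)).map
          (fun e => PySem.Chars.lower (PySem.Chars.strip e))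
      let normalizedHost := PySem.Chars.lower host.toList
      -- the for loop with early 'return True' and final 'return False' is List.any
      entries.any (fun entry =>
        if entry = ['*'] then true
        else
          -- entry.lstrip("."): drop leading '.' characters (exact, hand-ported)
          let trimmed := entry.dropWhile (· == '.')
          decide (normalizedHost = trimmed)
            || PySem.Chars.endswith normalizedHost ('.' :: trimmed))

-- ===== PORT B =====
def should_bypass_proxy_alt (host : String) (no_proxy : Option String) : Bool :=
  match no_proxy with
  | none => false
  | some np =>
    if np = "" then false
    else
      -- entries = {e.strip().lower() for e in no_proxy.split(",") if e.strip()}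
      let entries : PySem.Set (List Char) := PySem.Set.ofList
        (((PySem.Chars.splitOn np.toList [',']).filter
            (fun e => !(PySem.Chars.strip e).isEmpty)).map
          (fun e => PySem.Chars.lower (PySem.Chars.strip e)))
      if PySem.Set.contains entries ['*'] then true
      else
        -- bypass = {e.lstrip(".") for e in entries}   (lstrip("."): drop leading '.', exact)
        let bypass : PySem.Set (List Char) :=
          PySem.Set.ofList (entries.map (fun e => e.dropWhile (· == '.')))
        let h := PySem.Chars.lower host.toList
        -- candidates = {h} | {h[i+1:] for i, c in enumerate(h) if c == "."}
        let candidates : PySem.Set (List Char) :=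
          PySem.Set.union (PySem.Set.ofList [h])
            (PySem.Set.ofList (((PySem.List.enumerate h 0).filter (fun p => p.2 == '.')).map
              (fun p => PySem.List.slice h (some (p.1 + 1)) none)))
        !(PySem.Set.isdisjoint bypass candidates)

-- ===== PRECONDITION & SPEC =====
def Spec_should_bypass_proxy (host : String) (no_proxy : Option String) (out : Bool) : Prop := out = should_bypass_proxy_alt host no_proxy
instance (host : String) (no_proxy : Option String) (out : Bool) : Decidable (Spec_should_bypass_proxy host no_proxy out) := by unfold Spec_should_bypass_proxy; infer_instance

-- ===== CLAIM (what is proved, stated in full; the proofs are below) =====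
def Claim_equal_should_bypass_proxy : Prop := ∀ (host : String) (no_proxy : Option String), Dom_should_bypass_proxy host no_proxy → Spec_should_bypass_proxy host no_proxy (should_bypass_proxy host no_proxy)

-- ===== LEMMAS AND PROOFS =====

-- host ends with "." ++ t  iff  t is the part of host after some '.' at position i
lemma pv_dot_suffix_iff (h t : List Char) :
    ('.' :: t) <:+ h ↔ ∃ i : Nat, ∃ hi : i < h.length, h[i] = '.' ∧ h.drop (i + 1) = t := by
  constructor
  · rintro ⟨p, rfl⟩
    exact ⟨p.length, by simp, by simp, by simp [List.drop_append]⟩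
  · rintro ⟨i, hi, hdot, rfl⟩
    exact ⟨h.take i, by rw [← hdot, ← List.drop_eq_getElem_cons hi, List.take_append_drop]⟩

-- membership in B's candidate set, phrased as A's per-entry test
lemma pv_mem_candidates (h t : List Char) :
    (t = h ∨ ('.' :: t) <:+ h) ↔
      t ∈ PySem.Set.union (PySem.Set.ofList [h])
        (PySem.Set.ofList (((PySem.List.enumerate h 0).filter (fun p => p.2 == '.')).map
          (fun p => PySem.List.slice h (some (p.1 + 1)) none))) := by
  rw [PySem.Set.mem_union, PySem.Set.mem_ofList, PySem.Set.mem_ofList, pv_dot_suffix_iff]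
  simp only [List.mem_singleton, List.mem_map, List.mem_filter,
    PySem.List.enumerate_eq_zipIdx_map, beq_iff_eq]
  constructor
  · rintro (rfl | ⟨i, hi, hdot, rfl⟩)
    · exact Or.inl rfl
    · refine Or.inr ⟨((i : Int), h[i]), ⟨⟨(h[i], i), ?_, by simp⟩, hdot⟩, ?_⟩
      · exact List.mem_zipIdx_iff_getElem?.mpr (by simp [hi])
      · rw [show (i : Int) + 1 = ((i + 1 : Nat) : Int) by push_cast; ring,
          PySem.List.slice_from h (by positivity)]
        simp
  · rintro (rfl | ⟨q, ⟨hqmem, hqdot⟩, rfl⟩)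
    · exact Or.inl rfl
    · obtain ⟨⟨c', i⟩, hmem, rfl⟩ := hqmem
      have hget := List.mem_zipIdx_iff_getElem?.mp hmem
      simp only [List.getElem?_eq_some_iff] at hget
      obtain ⟨hi, hc⟩ := hget
      refine Or.inr ⟨i, hi, by simp_all, ?_⟩
      rw [show (0 : Int) + (i : Int) + 1 = ((i + 1 : Nat) : Int) by push_cast; ring,
        PySem.List.slice_from h (by positivity)]
      simp

-- ===== VERDICT (by name: the statement is the Claim_ definition above) =====
theorem should_bypass_proxy_spec : Claim_equal_should_bypass_proxy := by
  intro host no_proxy _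
  unfold Spec_should_bypass_proxy should_bypass_proxy should_bypass_proxy_alt
  cases no_proxy with
  | none => rfl
  | some np =>
    by_cases hnp : np = ""
    · simp [hnp]
    · simp only [hnp, if_false]
      set E := ((PySem.Chars.splitOn np.toList [',']).filter
          (fun e => !(PySem.Chars.strip e).isEmpty)).map
          (fun e => PySem.Chars.lower (PySem.Chars.strip e)) with hE
      set nh := PySem.Chars.lower host.toList with hnh
      rw [Bool.eq_iff_iff]
      simp only [List.any_eq_true, PySem.Set.isdisjoint, Bool.not_not,
        PySem.Set.contains, List.contains_eq_mem, decide_eq_true_iff]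
      constructor
      · rintro ⟨e, he, hf⟩
        by_cases hw : ['*'] ∈ PySem.Set.ofList E
        · simp [hw]
        · rw [if_neg hw]
          have hstar : e ≠ ['*'] := fun h => hw ((PySem.Set.mem_ofList E _).mpr (h ▸ he))
          rw [if_neg hstar] at hf
          simp only [Bool.or_eq_true, decide_eq_true_iff, PySem.Chars.endswith_iff] at hf
          simp only [List.any_eq_true, decide_eq_true_iff]
          refine ⟨e.dropWhile (· == '.'), ?_, ?_⟩
          · rw [PySem.Set.mem_ofList]
            exact List.mem_map_of_mem ((PySem.Set.mem_ofList E _).mpr he)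
          · exact (pv_mem_candidates nh _).mp (by tauto)
      · split_ifs with hw
        · intro _
          have : ['*'] ∈ E := (PySem.Set.mem_ofList E _).mp hw
          exact ⟨['*'], this, by simp⟩
        · simp only [List.any_eq_true, decide_eq_true_iff]
          rintro ⟨t, ht, hc⟩
          rw [PySem.Set.mem_ofList] at ht
          obtain ⟨e, he, rfl⟩ := List.mem_map.mp ht
          rw [PySem.Set.mem_ofList] at he
          refine ⟨e, he, ?_⟩
          have hstar : e ≠ ['*'] := by
            rintro rfl; exact absurd ((PySem.Set.mem_ofList E _).mpr he) (by simpa using hw)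
          rw [if_neg hstar]
          have := (pv_mem_candidates nh _).mpr hc
          simp only [Bool.or_eq_true, decide_eq_true_iff, PySem.Chars.endswith_iff]
          tauto
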